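-- pv_equiv track=rewrite | github.com/pypi-data/pypi-mirror-261 | packages/xython/xython-2.2.3.tar.gz/xython-2.2.3/src/xython/pynal.py | time_list_by_step
-- ===== SOURCE A (Python) =====
-- def time_list_by_step(start_hsm_list, step=30, cycle=20):
-- 	# pynal - 시작과 종료시간을 입력하면, 30분간격으로 시간목록을 자동으로 생성시키는것
-- 	# 시작과 종료시간을 입력하면, 30분간격으로 시간목록을 자동으로 생성시키는것
-- 	result = []
-- 	hour, min, sec = start_hsm_list
-- 	result.append([hour, min, sec])
-- 	for one in range(cycle):
-- 		min = min + step
-- 		over_min, min = divmod(min, 60)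
-- 		if over_min > 0:
-- 			hour = hour + over_min
-- 		hour = divmod(hour, 24)[1]
-- 		result.append([hour, min, sec])
-- 	return result
-- ===== SOURCE B (Python) =====
-- def time_list_by_step(start_hsm_list, step=30, cycle=20):
--     # Each entry comes from the closed form total = min + i*step:
--     # minutes are total % 60, hours are hour plus the accumulated carry, mod 24.
--     hour, min, sec = start_hsm_list
--     result = [[hour, min, sec]]
--     for i in range(1, cycle + 1):
--         total = min + i * step
--         result.append([(hour + total // 60) % 24, total % 60, sec])
--     return result
-- ===== Notes on version B (the rewrite author's own statement) =====
-- stated objective: simpler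
-- what changed: B computes each entry directly from the closed form total = min + i*step (minutes = total % 60, hours = (hour + total//60) % 24) instead of A's running hour/min state updated by per-step divmod carries.
-- intended difference: On inputs where some step yields a negative hour carry whose accumulated drop is not a multiple of 24 (min+step negative, or a negative step crossing an hour boundary), A's 'if over_min > 0' guard silently discards the carry so hours never decrease, while B applies it and returns the correctly decremented hour, which is the intended time arithmetic. — e.g. on time_list_by_step([10, 0, 0], -30, 1): A returns [[10, 0, 0], [10, 30, 0]], B returns [[10, 0, 0], [9, 30, 0]]
import Mathlib
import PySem

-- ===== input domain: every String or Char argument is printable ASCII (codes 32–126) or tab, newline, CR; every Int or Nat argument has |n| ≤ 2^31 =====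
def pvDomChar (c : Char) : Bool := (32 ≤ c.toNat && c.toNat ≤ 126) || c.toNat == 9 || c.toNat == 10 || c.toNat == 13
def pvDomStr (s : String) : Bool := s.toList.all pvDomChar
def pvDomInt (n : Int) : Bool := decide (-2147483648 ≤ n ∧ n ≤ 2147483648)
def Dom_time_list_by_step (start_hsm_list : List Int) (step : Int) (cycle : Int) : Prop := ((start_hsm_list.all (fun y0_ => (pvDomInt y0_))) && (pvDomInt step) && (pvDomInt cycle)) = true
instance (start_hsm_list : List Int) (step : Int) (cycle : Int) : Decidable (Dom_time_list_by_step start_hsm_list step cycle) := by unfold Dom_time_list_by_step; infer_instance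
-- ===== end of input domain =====

-- B computes each entry from the closed form total = min + i*step (minutes = total % 60, hours =
-- (hour + total//60) % 24) instead of A's running hour/min divmod state; objective: simpler.
-- Intended difference (D_): where a step yields a negative hour carry, A's 'if over_min > 0'
-- drops the carry so hours never decrease; B applies it. D_ is exact (A ≠ B everywhere inside it).


-- ===== PORT A =====
-- loop body of A: state = (result, hour, min)
def tlbsStepA (step sec : Int) (st : List (List Int) × Int × Int) (_ : Int) :
    List (List Int) × Int × Int :=
  let result := st.1
  let hour := st.2.1
  let min := st.2.2
  let min := min + step
  let over_min := PySem.Int.floordiv min 60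
  let min := PySem.Int.mod min 60
  let hour := if over_min > 0 then hour + over_min else hour
  let hour := PySem.Int.mod hour 24
  (result ++ [[hour, min, sec]], hour, min)

def time_list_by_step (start_hsm_list : List Int) (step : Int) (cycle : Int) : List (List Int) :=
  match start_hsm_list with
  | [hour, min, sec] =>
    ((PySem.List.pyRange 0 cycle 1).foldl (tlbsStepA step sec)
      ([[hour, min, sec]], hour, min)).1
  | _ => []  -- unpacking raises ValueError in Python; outside Pre_

-- ===== PORT B =====
-- loop body of B: state = result list only
def tlbsStepB (step min0 hour0 sec : Int) (result : List (List Int)) (i : Int) :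
    List (List Int) :=
  let total := min0 + i * step
  result ++ [[PySem.Int.mod (hour0 + PySem.Int.floordiv total 60) 24,
              PySem.Int.mod total 60, sec]]

def time_list_by_step_alt (start_hsm_list : List Int) (step : Int) (cycle : Int) : List (List Int) :=
  match start_hsm_list with
  | hour :: min :: sec :: [] =>
    (PySem.List.pyRange 1 (cycle + 1) 1).foldl (tlbsStepB step min hour sec)
      [[hour, min, sec]]
  | [] => []
  | [_] => []
  | [_, _] => []
  | _ :: _ :: _ :: _ :: _ => []

-- ===== PRECONDITION & SPEC =====
-- Pre_: the tuple unpacking 'hour, min, sec = start_hsm_list' raises ValueError unless the list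
-- has exactly three elements; A returns on every length-3 list.
def Pre_time_list_by_step (start_hsm_list : List Int) (step : Int) (cycle : Int) : Prop :=
  start_hsm_list.length = 3
instance (start_hsm_list : List Int) (step : Int) (cycle : Int) : Decidable (Pre_time_list_by_step start_hsm_list step cycle) := by unfold Pre_time_list_by_step; infer_instance
def pvWitness_time_list_by_step : List Int × Int × Int := ([9, 45, 0], 30, 3)

-- By how much A's hour at entry i exceeds B's: A ignores negative carries, so for step ≥ 0 it is
-- ahead by the dropped (negative) first carry min((min+step)//60, 0), and for step < 0 it is stuck
-- at hour + max((min+step)//60, 0) while B's hour follows (min + i*step)//60 downwards.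
def tlbsF (m s i : Int) : Int := PySem.Int.floordiv (m + i * s) 60
def tlbsOff (m s i : Int) : Int :=
  if 0 ≤ s then max (-tlbsF m s 1) 0 else max (tlbsF m s 1) 0 - tlbsF m s i

-- On inputs where some step yields a negative hour carry whose accumulated drop is not a multiple
-- of 24 (min+step negative, or a negative step crossing an hour boundary), A's 'if over_min > 0'
-- guard silently discards the carry so hours never decrease, while B applies it and returns the
-- correctly decremented hour, which is the intended time arithmetic. (Searching one 1440-step
-- period suffices: the dropped amount repeats modulo 24 every 1440 steps.)
def D_time_list_by_step (start_hsm_list : List Int) (step : Int) (cycle : Int) : Prop :=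
  ∃ i ∈ PySem.List.pyRange 1 (min cycle 1440 + 1) 1,
    ¬ (24 ∣ tlbsOff (start_hsm_list.getD 1 0) step i)
instance (start_hsm_list : List Int) (step : Int) (cycle : Int) : Decidable (D_time_list_by_step start_hsm_list step cycle) := by unfold D_time_list_by_step; infer_instance

def Spec_time_list_by_step (start_hsm_list : List Int) (step : Int) (cycle : Int) (out : List (List Int)) : Prop := ¬ D_time_list_by_step start_hsm_list step cycle → out = time_list_by_step_alt start_hsm_list step cycle
instance (start_hsm_list : List Int) (step : Int) (cycle : Int) (out : List (List Int)) : Decidable (Spec_time_list_by_step start_hsm_list step cycle out) := by unfold Spec_time_list_by_step; infer_instance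

def pvDiffWitness_time_list_by_step : List Int × Int × Int := ([10, 0, 0], -30, 1)
def pvDiffWitnessOut_time_list_by_step : (List (List Int)) × (List (List Int)) :=
  ([[10, 0, 0], [10, 30, 0]], [[10, 0, 0], [9, 30, 0]])

-- ===== CLAIM (what is proved, stated in full; the proofs are below) =====
def Claim_unchanged_time_list_by_step : Prop := ∀ (start_hsm_list : List Int) (step : Int) (cycle : Int), Dom_time_list_by_step start_hsm_list step cycle → Pre_time_list_by_step start_hsm_list step cycle → Spec_time_list_by_step start_hsm_list step cycle (time_list_by_step start_hsm_list step cycle)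
def Claim_changed_time_list_by_step : Prop := Dom_time_list_by_step (pvDiffWitness_time_list_by_step.1) (pvDiffWitness_time_list_by_step.2.1) (pvDiffWitness_time_list_by_step.2.2) ∧ Pre_time_list_by_step (pvDiffWitness_time_list_by_step.1) (pvDiffWitness_time_list_by_step.2.1) (pvDiffWitness_time_list_by_step.2.2) ∧ D_time_list_by_step (pvDiffWitness_time_list_by_step.1) (pvDiffWitness_time_list_by_step.2.1) (pvDiffWitness_time_list_by_step.2.2) ∧ time_list_by_step (pvDiffWitness_time_list_by_step.1) (pvDiffWitness_time_list_by_step.2.1) (pvDiffWitness_time_list_by_step.2.2) = pvDiffWitnessOut_time_list_by_step.1 ∧ time_list_by_step_alt (pvDiffWitness_time_list_by_step.1) (pvDiffWitness_time_list_by_step.2.1) (pvDiffWitness_time_list_by_step.2.2) = pvDiffWitnessOut_time_list_by_step.2 ∧ pvDiffWitnessOut_time_list_by_step.1 ≠ pvDiffWitnessOut_time_list_by_step.2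
def Claim_exact_time_list_by_step : Prop := ∀ (start_hsm_list : List Int) (step : Int) (cycle : Int), Dom_time_list_by_step start_hsm_list step cycle → Pre_time_list_by_step start_hsm_list step cycle → D_time_list_by_step start_hsm_list step cycle → time_list_by_step start_hsm_list step cycle ≠ time_list_by_step_alt start_hsm_list step cycle

-- ===== LEMMAS AND PROOFS =====

-- the entry A produces at index i (hour shifted by tlbsOff against B's closed form)
def tlbsEntryA (hour0 min0 sec step : Int) (i : Int) : List Int :=
  [(hour0 + ((min0 + i * step) / 60 + tlbsOff min0 step i)) % 24, (min0 + i * step) % 60, sec]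

-- the entry B produces at index i
def tlbsEntryB (hour0 min0 sec step : Int) (i : Int) : List Int :=
  [PySem.Int.mod (hour0 + PySem.Int.floordiv (min0 + i * step) 60) 24,
   PySem.Int.mod (min0 + i * step) 60, sec]

lemma tlbsOff_succ (min0 step k : Int) (hs : ¬ 0 ≤ step) :
    (min0 + (k + 1) * step) / 60 + tlbsOff min0 step (k + 1)
      = (min0 + k * step) / 60 + tlbsOff min0 step k := by
  simp only [tlbsOff, tlbsF, if_neg hs,
    PySem.Int.floordiv_eq_ediv_of_pos (by norm_num : (0:Int) < 60)]
  ring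

lemma tlbsF_shift (m s i : Int) : tlbsF m s (i + 1440) = tlbsF m s i + 24 * s := by
  simp only [tlbsF, PySem.Int.floordiv_eq_ediv_of_pos (by norm_num : (0:Int) < 60)]
  rw [show m + (i + 1440) * s = m + i * s + 24 * s * 60 by ring,
      Int.add_mul_ediv_right _ _ (by norm_num : (60:Int) ≠ 0)]

lemma tlbsOff_shift_dvd (m s i : Int) :
    (24 ∣ tlbsOff m s (i + 1440)) ↔ 24 ∣ tlbsOff m s i := by
  simp only [tlbsOff]
  split_ifs
  · exact Iff.rfl
  · rw [tlbsF_shift]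
    constructor <;> intro h <;> omega

lemma tlbsOff_period (m s j : Int) :
    ∀ t : ℕ, (24 ∣ tlbsOff m s (j + 1440 * t)) ↔ 24 ∣ tlbsOff m s j := by
  intro t
  induction t with
  | zero => simp
  | succ t ih =>
    rw [show j + 1440 * ((t + 1 : ℕ) : Int) = (j + 1440 * t) + 1440 by push_cast; ring,
        tlbsOff_shift_dvd]
    exact ih

-- if every offset over one period is a multiple of 24, every offset up to cycle is
lemma tlbsOff_dvd_of_all (m s c : Int)
    (hall : ∀ j ∈ PySem.List.pyRange 1 (min c 1440 + 1) 1, 24 ∣ tlbsOff m s j)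
    (i : Int) (h1 : 1 ≤ i) (h2 : i ≤ c) : 24 ∣ tlbsOff m s i := by
  obtain ⟨n, hn⟩ : ∃ n : ℕ, (i - 1) / 1440 = (n : Int) := ⟨((i - 1) / 1440).toNat, by omega⟩
  have hi : i = ((i - 1) % 1440 + 1) + 1440 * (n : Int) := by omega
  have hjmem : (i - 1) % 1440 + 1 ∈ PySem.List.pyRange 1 (min c 1440 + 1) 1 := by
    rw [PySem.List.mem_pyRange_one]
    omega
  rw [hi]
  exact (tlbsOff_period m s ((i - 1) % 1440 + 1) n).mpr (hall _ hjmem)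

-- A's loop from entry k+1 on, given the reduced state reached after k ≥ 1 iterations.
lemma tlbs_A_loop (hour0 min0 sec step : Int) :
    ∀ (n : ℕ) (k : Int) (res : List (List Int)) (h m : Int),
      1 ≤ k →
      m = (min0 + k * step) % 60 →
      h = (hour0 + ((min0 + k * step) / 60 + tlbsOff min0 step k)) % 24 →
      ((PySem.List.pyRange k (k + n) 1).foldl (tlbsStepA step sec) (res, h, m)).1
        = res ++ (PySem.List.pyRange (k + 1) (k + 1 + n) 1).map (tlbsEntryA hour0 min0 sec step) := by
  intro n
  induction n with
  | zero =>
    intro k res h m _ _ _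
    simp [PySem.List.pyRange_one_eq_nil]
  | succ n ih =>
    intro k res h m hk hm hh
    rw [show (k + (↑(n + 1) : Int)) = (k + 1) + ↑n by push_cast; ring,
        show (k + 1 + (↑(n + 1) : Int)) = (k + 1 + 1) + ↑n by push_cast; ring]
    rw [PySem.List.pyRange_one_cons (by omega : k < (k + 1) + (n : Int)),
        PySem.List.pyRange_one_cons (by omega : k + 1 < (k + 1 + 1) + (n : Int))]
    simp only [List.foldl_cons, List.map_cons]
    have h60 : (0:Int) < 60 := by norm_num
    have h24 : (0:Int) < 24 := by norm_num
    show ((PySem.List.pyRange (k+1) (k+1+(n:Int)) 1).foldl (tlbsStepA step sec)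
            (tlbsStepA step sec (res, h, m) k)).1
        = res ++ (tlbsEntryA hour0 min0 sec step (k+1)
            :: (PySem.List.pyRange (k+1+1) (k+1+1+(n:Int)) 1).map (tlbsEntryA hour0 min0 sec step))
    simp only [tlbsStepA,
      PySem.Int.floordiv_eq_ediv_of_pos h60, PySem.Int.mod_eq_emod_of_pos h60,
      PySem.Int.mod_eq_emod_of_pos h24]
    have hkstep : (k + 1) * step = k * step + step := by ring
    have hm' : (m + step) % 60 = (min0 + (k + 1) * step) % 60 := by
      omega
    have hh' : (if (m + step) / 60 > 0 then h + (m + step) / 60 else h) % 24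
        = (hour0 + ((min0 + (k + 1) * step) / 60 + tlbsOff min0 step (k + 1))) % 24 := by
      by_cases hs : 0 ≤ step
      · -- carry is nonnegative; guard adds it (adding 0 when it is 0)
        have hoff : tlbsOff min0 step (k + 1) = tlbsOff min0 step k := by
          simp [tlbsOff, if_pos hs]
        rw [hoff]
        by_cases hgt : (m + step) / 60 > 0
        · rw [if_pos hgt]; omega
        · rw [if_neg hgt]; omega
      · -- step < 0: the carry is ≤ 0 (m < 60 so m + step < 60), the guard skips, the
        -- shifted-hour expression is constant by tlbsOff_succ
        rw [if_neg (by omega), tlbsOff_succ min0 step k hs]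
        omega
    rw [hm', hh']
    rw [ih (k + 1) _ _ _ (by omega) rfl rfl]
    simp [tlbsEntryA, List.append_assoc]

-- A's whole output, characterised entrywise.
lemma tlbs_A_out (hour0 min0 sec step cycle : Int) (hc : 1 ≤ cycle) :
    time_list_by_step [hour0, min0, sec] step cycle
      = [hour0, min0, sec] ::
          (PySem.List.pyRange 1 (cycle + 1) 1).map (tlbsEntryA hour0 min0 sec step) := by
  obtain ⟨n, hn⟩ : ∃ n : ℕ, cycle = (n : Int) := ⟨cycle.toNat, by omega⟩
  subst hn
  show ((PySem.List.pyRange 0 (n : Int) 1).foldl (tlbsStepA step sec)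
      ([[hour0, min0, sec]], hour0, min0)).1 = _
  rw [PySem.List.pyRange_one_cons (by omega : (0:Int) < (n : Int)), List.foldl_cons,
      show ((0:Int) + 1) = 1 by norm_num]
  have h60 : (0:Int) < 60 := by norm_num
  have h24 : (0:Int) < 24 := by norm_num
  obtain ⟨p, hp⟩ : ∃ p : ℕ, n = p + 1 := ⟨n - 1, by omega⟩
  subst hp
  have hstep1 : tlbsStepA step sec ([[hour0, min0, sec]], hour0, min0) 0
      = ([[hour0, min0, sec]] ++ [tlbsEntryA hour0 min0 sec step 1],
         (hour0 + ((min0 + 1 * step) / 60 + tlbsOff min0 step 1)) % 24,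
         (min0 + 1 * step) % 60) := by
    have eh : (if (min0 + step) / 60 > 0 then hour0 + (min0 + step) / 60 else hour0) % 24
        = (hour0 + ((min0 + 1 * step) / 60 + tlbsOff min0 step 1)) % 24 := by
      simp only [tlbsOff, tlbsF, PySem.Int.floordiv_eq_ediv_of_pos h60]
      split_ifs <;> omega
    have em : (min0 + step) % 60 = (min0 + 1 * step) % 60 := by omega
    simp only [tlbsStepA, tlbsEntryA,
      PySem.Int.floordiv_eq_ediv_of_pos h60, PySem.Int.mod_eq_emod_of_pos h60,
      PySem.Int.mod_eq_emod_of_pos h24, Prod.mk.injEq]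
    refine ⟨?_, ?_, ?_⟩
    · rw [eh, em]
    · exact eh
    · exact em
  rw [hstep1]
  have key := tlbs_A_loop hour0 min0 sec step p 1
    ([[hour0, min0, sec]] ++ [tlbsEntryA hour0 min0 sec step 1])
    ((hour0 + ((min0 + 1 * step) / 60 + tlbsOff min0 step 1)) % 24)
    ((min0 + 1 * step) % 60) (by omega) rfl rfl
  rw [show (((p : ℕ) + 1 : ℕ) : Int) = 1 + (p : Int) by push_cast; ring, key]
  rw [show ((1:Int) + (p : Int) + 1) = (1 + 1 + (p : Int)) by ring]
  rw [PySem.List.pyRange_one_cons (by omega : (1:Int) < 1 + 1 + (p:Int)), List.map_cons]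
  simp

-- B's whole output, characterised entrywise.
lemma tlbs_B_out (hour0 min0 sec step cycle : Int) :
    time_list_by_step_alt [hour0, min0, sec] step cycle
      = [hour0, min0, sec] ::
          (PySem.List.pyRange 1 (cycle + 1) 1).map (tlbsEntryB hour0 min0 sec step) := by
  show (PySem.List.pyRange 1 (cycle + 1) 1).foldl (tlbsStepB step min0 hour0 sec)
      [[hour0, min0, sec]] = _
  have h : (PySem.List.pyRange 1 (cycle + 1) 1).foldl (tlbsStepB step min0 hour0 sec)
      [[hour0, min0, sec]]
      = [[hour0, min0, sec]] ++
          (PySem.List.pyRange 1 (cycle + 1) 1).map (tlbsEntryB hour0 min0 sec step) := by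
    rw [← PySem.List.foldl_append_singleton_eq_map]
    rfl
  rw [h]
  rfl

-- the two entries agree exactly when the hour offset is a multiple of 24
lemma tlbs_entry_eq_iff (hour0 min0 sec step i : Int) :
    tlbsEntryA hour0 min0 sec step i = tlbsEntryB hour0 min0 sec step i
      ↔ (24 : Int) ∣ tlbsOff min0 step i := by
  have h60 : (0:Int) < 60 := by norm_num
  have h24 : (0:Int) < 24 := by norm_num
  simp only [tlbsEntryA, tlbsEntryB,
    PySem.Int.floordiv_eq_ediv_of_pos h60, PySem.Int.mod_eq_emod_of_pos h60,
    PySem.Int.mod_eq_emod_of_pos h24, List.cons.injEq, and_true, tlbsOff, tlbsF]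
  split_ifs <;> omega

-- ===== VERDICT (by name: the statement is the Claim_ definition above) =====
theorem time_list_by_step_spec : Claim_unchanged_time_list_by_step := by
  intro start_hsm_list step cycle _ hpre
  unfold Spec_time_list_by_step
  intro hnd
  match start_hsm_list, hpre with
  | [hour, min, sec], _ =>
    by_cases hc : cycle ≤ 0
    · unfold time_list_by_step time_list_by_step_alt
      rw [PySem.List.pyRange_one_eq_nil hc, PySem.List.pyRange_one_eq_nil (by omega)]
      rfl
    · rw [tlbs_A_out hour min sec step cycle (by omega), tlbs_B_out]
      congr 1
      apply List.map_congr_left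
      intro i hi
      rw [PySem.List.mem_pyRange_one] at hi
      rw [tlbs_entry_eq_iff]
      refine tlbsOff_dvd_of_all min step cycle ?_ i (by omega) (by omega)
      intro j hjm
      by_contra hdvd
      exact hnd ⟨j, hjm, by simpa using hdvd⟩

theorem time_list_by_step_changed : Claim_changed_time_list_by_step := by
  unfold Claim_changed_time_list_by_step; decide

theorem time_list_by_step_tight : Claim_exact_time_list_by_step := by
  intro start_hsm_list step cycle _ hpre hd heq
  match start_hsm_list, hpre with
  | [hour, min, sec], _ =>
    obtain ⟨i, hi, hdvd⟩ := hd
    rw [PySem.List.mem_pyRange_one] at hi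
    rw [tlbs_A_out hour min sec step cycle (by omega), tlbs_B_out] at heq
    have hmap := (List.cons.inj heq).2
    have hpt := (List.map_inj_left).mp hmap i
      (by rw [PySem.List.mem_pyRange_one]; omega)
    rw [tlbs_entry_eq_iff] at hpt
    exact hdvd (by simpa using hpt)
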